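-- pv_equiv track=rewrite | github.com/romainfd/competitions | 20.GoogleKickStart/template.py | solve
-- ===== SOURCE A (Python) =====
-- def solve(str_):
--     nb_kicks = 0
--     result = 0
--     for i in range(len(str_) - 4):
--         if str_[i : i + 4] == 'KICK':
--             nb_kicks += 1
--         elif str_[i : i + 5] == 'START':
--             result += nb_kicks
--     return result
-- ===== SOURCE B (Python) =====
-- def solve(str_):
--     n = len(str_)
--     kicks = [i for i in range(n - 3) if str_[i:i + 4] == 'KICK']
--     starts = [i for i in range(n - 4) if str_[i:i + 5] == 'START']
--     return sum(len([k for k in kicks if k < s]) for s in starts)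
-- ===== Notes on version B (the rewrite author's own statement) =====
-- stated objective: alternative
-- what changed: Replaced the fused single-pass running-counter accumulator by a build-index-then-query structure: B first builds the lists of KICK and START positions, then sums for each START the number of KICK indices strictly before it.
import Mathlib
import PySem

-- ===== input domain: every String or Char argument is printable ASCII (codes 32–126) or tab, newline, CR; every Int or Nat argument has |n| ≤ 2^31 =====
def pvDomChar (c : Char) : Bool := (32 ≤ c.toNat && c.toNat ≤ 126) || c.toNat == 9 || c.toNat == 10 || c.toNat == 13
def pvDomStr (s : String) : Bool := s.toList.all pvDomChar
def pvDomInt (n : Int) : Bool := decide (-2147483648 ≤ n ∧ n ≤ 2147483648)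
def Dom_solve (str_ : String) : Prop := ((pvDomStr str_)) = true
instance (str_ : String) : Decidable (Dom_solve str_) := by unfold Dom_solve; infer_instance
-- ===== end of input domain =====

-- B replaces A's fused running-counter pass by building the KICK/START position lists and
-- summing, for each START, the number of earlier KICKs (alternative decomposition, same values).

-- shared predicate helpers: str_[i:i+4] == 'KICK' and str_[i:i+5] == 'START'
def kickAt (l : List Char) (i : Int) : Bool :=
  decide (PySem.List.slice l (some i) (some (i + 4)) = "KICK".toList)

def startAt (l : List Char) (i : Int) : Bool :=
  decide (PySem.List.slice l (some i) (some (i + 5)) = "START".toList)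

-- ===== PORT A =====
def solve (str_ : String) : Int :=
  let l := str_.toList
  ((PySem.List.pyRange 0 (PySem.Str.len str_ - 4) 1).foldl
    (fun (st : Int × Int) i =>
      if kickAt l i then (st.1 + 1, st.2)
      else if startAt l i then (st.1, st.2 + st.1)
      else st) ((0 : Int), (0 : Int))).2

-- ===== PORT B =====
def solve_alt (str_ : String) : Int :=
  let l := str_.toList
  let n := PySem.Str.len str_
  let kicks := (PySem.List.pyRange 0 (n - 3) 1).filter (kickAt l)
  let starts := (PySem.List.pyRange 0 (n - 4) 1).filter (startAt l)
  (starts.map (fun s => ((kicks.filter (fun k => decide (k < s))).length : Int))).sum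

-- ===== PRECONDITION & SPEC =====
def Spec_solve (str_ : String) (out : Int) : Prop := out = solve_alt str_
instance (str_ : String) (out : Int) : Decidable (Spec_solve str_ out) := by unfold Spec_solve; infer_instance

-- ===== CLAIM (what is proved, stated in full; the proofs are below) =====
def Claim_equal_solve : Prop := ∀ (str_ : String), Dom_solve str_ → Spec_solve str_ (solve str_)

-- ===== LEMMAS AND PROOFS =====

-- number of KICK positions strictly below s
def kcount (l : List Char) (s : Int) : Int :=
  (((PySem.List.pyRange 0 s 1).filter (kickAt l)).length : Int)

-- a position cannot start both 'KICK' and 'START'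
lemma kick_not_start (l : List Char) (i : Int) (h : 0 ≤ i) :
    kickAt l i = true → startAt l i = false := by
  intro hk
  simp only [kickAt, startAt, decide_eq_true_eq, decide_eq_false_iff_not] at *
  rw [PySem.List.slice_toNat l h (by omega)] at hk
  rw [PySem.List.slice_toNat l h (by omega)]
  have h4 : (i + 4).toNat - i.toNat = 4 := by omega
  have h5 : (i + 5).toNat - i.toNat = 5 := by omega
  rw [h4] at hk
  rw [h5]
  generalize hd : List.drop i.toNat l = xs at hk ⊢
  rcases xs with _ | ⟨a, t⟩ <;> simp_all

-- A's loop invariant: the fold over the first m indices computes the KICK count and the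
-- sum over START positions of preceding-KICK counts
lemma fold_inv (l : List Char) (m : Nat) :
    (PySem.List.pyRange 0 (m : Int) 1).foldl
      (fun (st : Int × Int) i =>
        if kickAt l i then (st.1 + 1, st.2)
        else if startAt l i then (st.1, st.2 + st.1)
        else st) ((0 : Int), (0 : Int)) =
    (kcount l (m : Int),
     (((PySem.List.pyRange 0 (m : Int) 1).filter (startAt l)).map (fun s => kcount l s)).sum) := by
  induction m with
  | zero => simp [PySem.List.pyRange_one_eq_nil (by omega : (0:Int) ≤ 0), kcount]
  | succ m ih =>
    have hc : ((m + 1 : Nat) : Int) = (m : Int) + 1 := by push_cast; ring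
    rw [hc, PySem.List.pyRange_one_succ_right (by positivity), List.foldl_append, ih]
    simp only [List.foldl_cons, List.foldl_nil, List.filter_append, List.map_append,
      List.sum_append]
    by_cases hk : kickAt l (m : Int) = true
    · have hs := kick_not_start l (m : Int) (by positivity) hk
      simp [hk, hs, kcount, PySem.List.pyRange_one_succ_right (by positivity : (0:Int) ≤ (m:Int)),
        List.filter_append]
    · by_cases hs : startAt l (m : Int) = true
      · simp [hk, hs, kcount, PySem.List.pyRange_one_succ_right (by positivity : (0:Int) ≤ (m:Int)),
          List.filter_append]
      · simp [hk, hs, kcount, PySem.List.pyRange_one_succ_right (by positivity : (0:Int) ≤ (m:Int)),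
          List.filter_append]

-- B's per-START query equals the prefix KICK count
lemma kicks_filter_eq (l : List Char) (n s : Int) (h0 : 0 ≤ s) (h1 : s ≤ n - 3) :
    (((PySem.List.pyRange 0 (n - 3) 1).filter (kickAt l)).filter
        (fun k => decide (k < s))).length =
    ((PySem.List.pyRange 0 s 1).filter (kickAt l)).length := by
  rw [List.filter_filter]
  have hcomm : ∀ k : Int, (decide (k < s) && kickAt l k) = (kickAt l k && decide (k < s)) := by
    intro k; exact Bool.and_comm _ _
  rw [List.filter_congr (fun k _ => hcomm k), ← List.filter_filter]
  congr 1
  rw [PySem.List.pyRange_one_append 0 s (n - 3) h0 h1, List.filter_append]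
  have hl : (PySem.List.pyRange 0 s 1).filter (fun k => decide (k < s)) =
      PySem.List.pyRange 0 s 1 := by
    apply List.filter_eq_self.mpr
    intro k hk
    obtain ⟨hka, hkb⟩ := (PySem.List.mem_pyRange_one).1 hk
    simp only [decide_eq_true_eq]; omega
  have hr : (PySem.List.pyRange s (n - 3) 1).filter (fun k => decide (k < s)) = [] := by
    apply List.filter_eq_nil_iff.mpr
    intro k hk
    obtain ⟨hka, hkb⟩ := (PySem.List.mem_pyRange_one).1 hk
    simp only [decide_eq_true_eq]; omega
  rw [hl, hr, List.append_nil]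

-- ===== VERDICT (by name: the statement is the Claim_ definition above) =====
theorem solve_spec : Claim_equal_solve := by
  intro str_ _
  unfold Spec_solve solve solve_alt
  dsimp only
  simp only [PySem.Str.len_eq]
  generalize str_.toList = l
  by_cases hneg : (l.length : Int) - 4 ≤ 0
  · rw [PySem.List.pyRange_one_eq_nil hneg]
    simp
  · have hm : (l.length : Int) - 4 = ((((l.length : Int) - 4).toNat : Nat) : Int) := by omega
    rw [hm, fold_inv l ((l.length : Int) - 4).toNat]
    dsimp only
    apply congrArg List.sum
    apply List.map_congr_left
    intro s hs
    have hs' := (PySem.List.mem_pyRange_one).1 (List.mem_of_mem_filter hs)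
    have h0 : 0 ≤ s := hs'.1
    have h2 := hs'.2
    have h1 : s ≤ (l.length : Int) - 3 := by omega
    rw [kcount, kicks_filter_eq l (l.length : Int) s h0 h1]
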